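-- pv_equiv track=rewrite | github.com/PatPatDango/reaction-kernels | scripts/wp3/wp3_functions_refactored.py | choose_subsets_with_at_least_k_common_classes
-- ===== SOURCE A (Python) =====
-- from typing import Any, Callable, Dict, Iterable, List, Sequence, Tuple
-- from collections import Counter
--
-- def choose_subsets_with_at_least_k_common_classes(
--     index: Dict[int, Counter[Any]],
--     ref_classes: Iterable[Any],
--     k: int = 2,
--     min_per_class: int = 20,
-- ) -> List[int]:
--     ref = set(ref_classes)
--     good = []
--     for sid, cnt in index.items():
--         present = {c for c, n in cnt.items() if n >= min_per_class}
--         if len(present & ref) >= k: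
--             good.append(sid)
--     return sorted(good)
-- ===== SOURCE B (Python) =====
-- from collections import Counter
--
-- def choose_subsets_with_at_least_k_common_classes(index, ref_classes, k=2, min_per_class=20):
--     if k <= 0:
--         return sorted(index)
--     pairs = [(c, sid) for sid, cnt in index.items()
--              for c, n in cnt.items() if n >= min_per_class]
--     class_to_sids = {}
--     for c, sid in pairs:
--         class_to_sids.setdefault(c, []).append(sid)
--     tally = Counter()
--     for c in set(ref_classes):
--         for sid in class_to_sids.get(c, []):
--             tally[sid] += 1
--     return sorted(sid for sid, m in tally.items() if m >= k)
-- ===== Notes on version B (the rewrite author's own statement) =====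
-- stated objective: alternative
-- what changed: A scans each subset's counter, builds its set of sufficiently-frequent classes and intersects it with the reference set per subset; B instead builds an inverted class-to-subset-ids index in one pass, tallies matches per subset id by iterating the deduplicated reference classes, and returns the sorted ids whose tally reaches k (with k <= 0 returning all ids sorted).
import Mathlib
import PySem

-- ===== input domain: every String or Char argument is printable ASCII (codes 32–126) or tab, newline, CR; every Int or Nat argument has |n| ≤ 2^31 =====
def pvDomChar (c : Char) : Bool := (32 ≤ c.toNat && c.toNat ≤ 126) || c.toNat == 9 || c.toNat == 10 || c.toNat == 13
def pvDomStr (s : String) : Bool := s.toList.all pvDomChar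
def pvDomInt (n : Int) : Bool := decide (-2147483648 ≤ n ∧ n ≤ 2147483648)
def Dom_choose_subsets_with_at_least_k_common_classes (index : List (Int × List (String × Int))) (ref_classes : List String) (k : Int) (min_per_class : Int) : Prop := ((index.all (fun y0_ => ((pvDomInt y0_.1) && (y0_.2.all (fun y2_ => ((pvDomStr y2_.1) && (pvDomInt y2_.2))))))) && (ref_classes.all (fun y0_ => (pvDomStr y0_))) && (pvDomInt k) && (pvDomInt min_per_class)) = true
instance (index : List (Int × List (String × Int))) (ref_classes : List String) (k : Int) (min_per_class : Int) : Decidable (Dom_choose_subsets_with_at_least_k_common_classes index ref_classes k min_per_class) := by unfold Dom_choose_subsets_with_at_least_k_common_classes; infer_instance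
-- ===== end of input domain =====

-- B replaces the per-subset set-intersection scan by an inverted class→sids index plus a tally over the deduplicated reference classes (alternative decomposition, same exact result).


-- ===== PORT A =====
def choose_subsets_with_at_least_k_common_classes (index : List (Int × List (String × Int))) (ref_classes : List String) (k : Int) (min_per_class : Int) : List Int :=
  let ref : PySem.Set String := PySem.Set.ofList ref_classes
  let good : List Int :=
    (PySem.Dict.ofList index).items.foldl (fun good p =>
      let present : PySem.Set String :=
        PySem.Set.ofList (((PySem.Dict.ofList p.2).items.filter (fun q => min_per_class ≤ q.2)).map (fun q => q.1))
      if k ≤ ((PySem.Set.inter present ref).length : Int) then good ++ [p.1] else good) []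
  PySem.List.sorted good (fun x => x) false

-- ===== PORT B =====
def choose_subsets_with_at_least_k_common_classes_alt (index : List (Int × List (String × Int))) (ref_classes : List String) (k : Int) (min_per_class : Int) : List Int :=
  let idx := PySem.Dict.ofList index
  if k ≤ 0 then PySem.List.sorted idx.keys (fun x => x) false
  else
    let pairs : List (String × Int) :=
      idx.items.foldl (fun acc p =>
        acc ++ ((PySem.Dict.ofList p.2).items.filter (fun q => min_per_class ≤ q.2)).map (fun q => (q.1, p.1))) []
    let c2s : PySem.Dict String (List Int) :=
      pairs.foldl (fun d q => d.modify q.1 [] (fun l => l ++ [q.2])) PySem.Dict.empty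
    let tally : PySem.Dict Int Int :=
      (PySem.Set.ofList ref_classes).foldl (fun t c =>
        (c2s.getD c []).foldl (fun t sid => t.modify sid 0 (fun n => n + 1)) t) PySem.Dict.empty
    PySem.List.sorted ((tally.items.filter (fun q => k ≤ q.2)).map (fun q => q.1)) (fun x => x) false

-- ===== PRECONDITION & SPEC =====
def Spec_choose_subsets_with_at_least_k_common_classes (index : List (Int × List (String × Int))) (ref_classes : List String) (k : Int) (min_per_class : Int) (out : List Int) : Prop := out = choose_subsets_with_at_least_k_common_classes_alt index ref_classes k min_per_class
instance (index : List (Int × List (String × Int))) (ref_classes : List String) (k : Int) (min_per_class : Int) (out : List Int) : Decidable (Spec_choose_subsets_with_at_least_k_common_classes index ref_classes k min_per_class out) := by unfold Spec_choose_subsets_with_at_least_k_common_classes; infer_instance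

-- ===== CLAIM (what is proved, stated in full; the proofs are below) =====
def Claim_equal_choose_subsets_with_at_least_k_common_classes : Prop := ∀ (index : List (Int × List (String × Int))) (ref_classes : List String) (k : Int) (min_per_class : Int), Dom_choose_subsets_with_at_least_k_common_classes index ref_classes k min_per_class → Spec_choose_subsets_with_at_least_k_common_classes index ref_classes k min_per_class (choose_subsets_with_at_least_k_common_classes index ref_classes k min_per_class)

-- ===== LEMMAS AND PROOFS =====

-- qualifying classes of one counter: classes whose (deduplicated-dict) count is ≥ min_per_class
def pvQual (mn : Int) (cnt : List (String × Int)) : List String :=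
  ((PySem.Dict.ofList cnt).items.filter (fun q => decide (mn ≤ q.2))).map (fun q => q.1)

lemma pvQual_def (mn : Int) (cnt : List (String × Int)) :
    ((PySem.Dict.ofList cnt).items.filter (fun q => decide (mn ≤ q.2))).map (fun q => q.1) = pvQual mn cnt := rfl

lemma pvQual_nodup (mn : Int) (cnt : List (String × Int)) : (pvQual mn cnt).Nodup := by
  have h : (pvQual mn cnt).Sublist ((PySem.Dict.ofList cnt).items.map (fun q => q.1)) :=
    List.Sublist.map _ List.filter_sublist
  exact (PySem.Dict.nodup_keys_ofList cnt).sublist h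

lemma foldl_foldl_flatMap {α β γ : Type} (l : List α) (g : α → List β) (f : γ → β → γ) (init : γ) :
    l.foldl (fun t c => (g c).foldl f t) init = (l.flatMap g).foldl f init := by
  induction l generalizing init with
  | nil => simp
  | cons a t ih => simp [List.foldl_append, ih]

lemma countP_flatMap {α β : Type} (l : List α) (g : α → List β) (p : β → Bool) :
    (l.flatMap g).countP p = (l.map (fun a => (g a).countP p)).sum := by
  induction l with
  | nil => simp
  | cons a t ih => simp [List.countP_append, ih]

lemma sum_map_ite_mem {α : Type} [DecidableEq α] (l : List α) (Q : List α) :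
    (l.map (fun c => if c ∈ Q then 1 else 0)).sum = (l.filter (fun c => decide (c ∈ Q))).length := by
  induction l with
  | nil => rfl
  | cons a t ih =>
    by_cases h : a ∈ Q
    · simp [h, ih]; omega
    · simp [h, ih]

lemma length_filter_mem_comm {α : Type} [DecidableEq α] (a b : List α)
    (ha : a.Nodup) (hb : b.Nodup) :
    (a.filter (fun x => decide (x ∈ b))).length = (b.filter (fun x => decide (x ∈ a))).length := by
  rw [← List.toFinset_card_of_nodup (ha.filter _), ← List.toFinset_card_of_nodup (hb.filter _)]
  congr 1
  ext x
  simp only [List.mem_toFinset, List.mem_filter, decide_eq_true_eq]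
  tauto

lemma flatMap_countP_eq_single {α β : Type} (l : List α) (key : α → Int)
    (hnd : (l.map key).Nodup) (p : α) (hp : p ∈ l) (h : β → Bool) (g : α → List β)
    (hzero : ∀ p' ∈ l, key p' ≠ key p → (g p').countP h = 0) :
    (l.flatMap g).countP h = (g p).countP h := by
  induction l with
  | nil => cases hp
  | cons a t ih =>
    simp only [List.map_cons, List.nodup_cons] at hnd
    rcases List.mem_cons.mp hp with rfl | hpt
    · have : (t.flatMap g).countP h = 0 := by
        rw [countP_flatMap]
        apply List.sum_eq_zero
        intro x hx
        rcases List.mem_map.mp hx with ⟨p', hp', rfl⟩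
        exact hzero p' (List.mem_cons_of_mem _ hp')
          (fun e => hnd.1 (e ▸ List.mem_map_of_mem hp'))
      simp [List.countP_append, this]
    · have hka : key a ≠ key p := by
        intro e
        exact hnd.1 (e.symm ▸ List.mem_map_of_mem hpt)
      have h0 : (g a).countP h = 0 := hzero a (List.mem_cons_self) hka
      have := ih hnd.2 hpt (fun p' hp' hne => hzero p' (List.mem_cons_of_mem _ hp') hne)
      simp [List.countP_append, h0, this]


-- the (class, sid) pairs one subset contributes to the inverted index
def pvPairsOf (mn : Int) (p : Int × List (String × Int)) : List (String × Int) :=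
  ((PySem.Dict.ofList p.2).items.filter (fun q => decide (mn ≤ q.2))).map (fun q => (q.1, p.1))

lemma pvPairsOf_def (mn : Int) (p : Int × List (String × Int)) :
    ((PySem.Dict.ofList p.2).items.filter (fun q => decide (mn ≤ q.2))).map (fun q => (q.1, p.1)) = pvPairsOf mn p := rfl

lemma pvPairsOf_eq (mn : Int) (p : Int × List (String × Int)) :
    pvPairsOf mn p = (pvQual mn p.2).map (fun c => (c, p.1)) := by
  simp [pvPairsOf, pvQual, List.map_map]

-- the flattened tally stream of B, as one list
def pvL (index : List (Int × List (String × Int))) (ref_classes : List String) (mn : Int) : List Int :=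
  (PySem.Set.ofList ref_classes).flatMap (fun c =>
    (((PySem.Dict.ofList index).items.flatMap (pvPairsOf mn)).filter (fun q => q.1 == c)).map (fun q => q.2))

lemma mem_pvL {index : List (Int × List (String × Int))} {ref_classes : List String} {mn : Int}
    {s : Int} (h : s ∈ pvL index ref_classes mn) :
    ∃ p ∈ (PySem.Dict.ofList index).items, p.1 = s := by
  rcases List.mem_flatMap.mp h with ⟨c, _, hme⟩
  rcases List.mem_map.mp hme with ⟨q, hq, rfl⟩
  rcases List.mem_flatMap.mp (List.mem_of_mem_filter hq) with ⟨p, hp, hqp⟩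
  rw [pvPairsOf_eq] at hqp
  rcases List.mem_map.mp hqp with ⟨c', _, rfl⟩
  exact ⟨p, hp, rfl⟩

lemma count_pvL (index : List (Int × List (String × Int))) (ref_classes : List String) (mn : Int)
    (p : Int × List (String × Int)) (hp : p ∈ (PySem.Dict.ofList index).items) :
    (pvL index ref_classes mn).count p.1
      = (PySem.Set.inter (PySem.Set.ofList (pvQual mn p.2)) (PySem.Set.ofList ref_classes)).length := by
  have hkeys : ((PySem.Dict.ofList index).items.map (fun q => q.1)).Nodup :=
    PySem.Dict.nodup_keys_ofList index
  have hinner : ∀ c : String,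
      ((((PySem.Dict.ofList index).items.flatMap (pvPairsOf mn)).filter
          (fun q => q.1 == c)).map (fun q => q.2)).count p.1
        = if c ∈ pvQual mn p.2 then 1 else 0 := by
    intro c
    rw [List.count, List.countP_map, List.countP_filter]
    rw [flatMap_countP_eq_single _ (fun q => q.1) hkeys p hp _ _ ?hz]
    case hz =>
      intro p' _ hne
      rw [pvPairsOf_eq, List.countP_map, List.countP_eq_zero]
      intro c' _
      simp only [Function.comp]
      simp only [beq_iff_eq, Bool.and_eq_true]
      rintro ⟨h1, -⟩
      exact hne h1
    rw [pvPairsOf_eq, List.countP_map,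
        List.countP_congr (q := fun c' => c' == c) (fun a _ => by simp), ← List.count]
    by_cases hc : c ∈ pvQual mn p.2
    · rw [List.count_eq_one_of_mem (pvQual_nodup mn p.2) hc, if_pos hc]
    · rw [List.count_eq_zero.mpr hc, if_neg hc]
  rw [pvL, List.count, countP_flatMap]
  have : ∀ c ∈ PySem.Set.ofList ref_classes,
      ((((PySem.Dict.ofList index).items.flatMap (pvPairsOf mn)).filter
          (fun q => q.1 == c)).map (fun q => q.2)).countP (fun x => x == p.1)
        = (fun c => if c ∈ pvQual mn p.2 then 1 else 0) c := fun c _ => hinner c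
  rw [List.map_congr_left this, sum_map_ite_mem,
      length_filter_mem_comm _ _ (PySem.Set.nodup_ofList _) (pvQual_nodup mn p.2),
      PySem.Set.ofList_eq_self_of_nodup _ (pvQual_nodup mn p.2)]
  rw [PySem.Set.inter]
  have : List.filter (fun x => PySem.Set.contains (PySem.Set.ofList ref_classes) x) (pvQual mn p.2)
      = List.filter (fun x => decide (x ∈ PySem.Set.ofList ref_classes)) (pvQual mn p.2) :=
    List.filter_congr (fun x _ => by simp [PySem.Set.contains_eq_listContains])
  rw [this]

-- ===== VERDICT (by name: the statement is the Claim_ definition above) =====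
theorem choose_subsets_with_at_least_k_common_classes_spec : Claim_equal_choose_subsets_with_at_least_k_common_classes := by
  intro index ref_classes k mn _
  unfold Spec_choose_subsets_with_at_least_k_common_classes
  unfold choose_subsets_with_at_least_k_common_classes choose_subsets_with_at_least_k_common_classes_alt
  dsimp only
  simp only [pvQual_def, pvPairsOf_def]
  have hfoldA : ∀ (l : List (Int × List (String × Int))) (acc : List Int),
      l.foldl (fun good p => if k ≤ ((PySem.Set.inter (PySem.Set.ofList (pvQual mn p.2)) (PySem.Set.ofList ref_classes)).length : Int) then good ++ [p.1] else good) acc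
        = acc ++ (l.filter (fun p => decide (k ≤ ((PySem.Set.inter (PySem.Set.ofList (pvQual mn p.2)) (PySem.Set.ofList ref_classes)).length : Int)))).map (fun p => p.1) := by
    intro l
    induction l with
    | nil => simp
    | cons a t ih =>
      intro acc
      by_cases h : k ≤ ((PySem.Set.inter (PySem.Set.ofList (pvQual mn a.2)) (PySem.Set.ofList ref_classes)).length : Int)
      · simp [h, ih]
      · simp [h, ih]
  refine Eq.trans (congrArg (fun l => PySem.List.sorted l (fun x : Int => x)) (Eq.trans (hfoldA _ []) (List.nil_append _))) ?_
  by_cases hk : k ≤ 0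
  · rw [if_pos hk]
    have hall : List.filter (fun p : Int × List (String × Int) =>
        decide (k ≤ ((PySem.Set.inter (PySem.Set.ofList (pvQual mn p.2)) (PySem.Set.ofList ref_classes)).length : Int)))
        (PySem.Dict.ofList index).items = (PySem.Dict.ofList index).items :=
      List.filter_eq_self.mpr (fun p _ =>
        decide_eq_true (le_trans hk (Int.natCast_nonneg _)))
    rw [hall]
    rfl
  · rw [if_neg hk]
    have hklt : 0 < k := lt_of_not_ge hk
    rw [PySem.List.foldl_append_eq_flatMap, List.nil_append, foldl_foldl_flatMap]
    simp only [PySem.Dict.getD_foldl_modify_append, PySem.Dict.getD_empty, List.nil_append]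
    have hLdef : (PySem.Set.ofList ref_classes).flatMap (fun c =>
        (((PySem.Dict.ofList index).items.flatMap (fun p => pvPairsOf mn p)).filter
          (fun q => q.1 == c)).map (fun q => q.2)) = pvL index ref_classes mn := rfl
    rw [hLdef]
    have hkeysT : ((pvL index ref_classes mn).foldl
        (fun t sid => t.modify sid 0 (fun n => n + 1)) (PySem.Dict.empty : PySem.Dict Int Int)).keys
        = PySem.Set.ofList (pvL index ref_classes mn) := by
      refine Eq.trans (PySem.Dict.keys_foldl_modify _ 0 (fun _ _ => fun n => n + 1) _) ?_
      rw [PySem.Dict.keys_empty, PySem.Set.update_nil_left]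
    have hnodupT : ((pvL index ref_classes mn).foldl
        (fun t sid => t.modify sid 0 (fun n => n + 1)) (PySem.Dict.empty : PySem.Dict Int Int)).keys.Nodup := by
      rw [hkeysT]; exact PySem.Set.nodup_ofList _
    have hgetD : ∀ s : Int, ((pvL index ref_classes mn).foldl
        (fun t sid => t.modify sid 0 (fun n => n + 1)) (PySem.Dict.empty : PySem.Dict Int Int)).getD s 0
        = ((pvL index ref_classes mn).count s : Int) := by
      intro s
      refine Eq.trans (PySem.Dict.getD_foldl_modify_add_one _ _ _) ?_
      rw [PySem.Dict.getD_empty, zero_add]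
    have hitems : ((pvL index ref_classes mn).foldl
        (fun t sid => t.modify sid 0 (fun n => n + 1)) (PySem.Dict.empty : PySem.Dict Int Int)).items
        = (PySem.Set.ofList (pvL index ref_classes mn)).map
            (fun s => (s, ((pvL index ref_classes mn).count s : Int))) := by
      refine Eq.trans (PySem.Dict.items_eq_map_keys _ hnodupT 0) ?_
      rw [hkeysT]
      exact List.map_congr_left (fun s _ => by rw [hgetD])
    rw [hitems, List.filter_map, List.map_map]
    have hmapid : ((fun q : Int × Int => q.1) ∘ fun s => (s, ((pvL index ref_classes mn).count s : Int)))
        = fun s => s := rfl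
    rw [hmapid, List.map_id']
    apply PySem.List.sorted_eq_sorted_of_perm _ _ _ (fun a b h => h)
    have hA : (List.map (fun p : Int × List (String × Int) => p.1)
        (List.filter (fun p =>
            decide (k ≤ ((PySem.Set.inter (PySem.Set.ofList (pvQual mn p.2)) (PySem.Set.ofList ref_classes)).length : Int)))
          (PySem.Dict.ofList index).items)).Nodup :=
      (PySem.Dict.nodup_keys_ofList index).sublist (List.Sublist.map _ List.filter_sublist)
    have hB : ((PySem.Set.ofList (pvL index ref_classes mn)).filter
        ((fun q : Int × Int => decide (k ≤ q.2)) ∘ fun s => (s, ((pvL index ref_classes mn).count s : Int)))).Nodup :=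
      (PySem.Set.nodup_ofList _).filter _
    refine (List.perm_ext_iff_of_nodup hA hB).mpr ?_
    intro s
    simp only [List.mem_map, List.mem_filter, Function.comp, decide_eq_true_eq]
    constructor
    · rintro ⟨p, ⟨hpi, hcond⟩, rfl⟩
      have hc := count_pvL index ref_classes mn p hpi
      have hkcond : k ≤ ((pvL index ref_classes mn).count p.1 : Int) := by
        rw [hc]; exact hcond
      have hpos : 0 < (pvL index ref_classes mn).count p.1 := by
        exact_mod_cast lt_of_lt_of_le hklt hkcond
      exact ⟨(PySem.Set.mem_ofList _ _).mpr (List.count_pos_iff.mp hpos), hkcond⟩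
    · rintro ⟨hmem, hcnt⟩
      obtain ⟨p, hpi, rfl⟩ := mem_pvL ((PySem.Set.mem_ofList _ _).mp hmem)
      have hc := count_pvL index ref_classes mn p hpi
      exact ⟨p, ⟨hpi, by rw [← hc]; exact hcnt⟩, rfl⟩
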